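-- pv_equiv track=rewrite | github.com/MrBrantCode/unitest_baseline | mut_generate/mist_train_cf/cf_3659/solution.py | unique_words_with_vowels
-- ===== SOURCE A (Python) =====
-- def unique_words_with_vowels(string):
--     vowels = ['a', 'e', 'i', 'o', 'u']
--     word_set = set()
--
--     words = string.split()
--
--     for word in words:
--         # Check if word starts with a vowel
--         if word[0].lower() in vowels:
--             continue
--
--         # Check if word contains consecutive string of three or more vowels
--         has_consecutive_vowels = False
--         count = 0
--         for letter in word:
--             if letter.lower() in vowels:
--                 count += 1
--                 if count >= 3:
--                     has_consecutive_vowels = True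
--                     break
--             else:
--                 count = 0
--
--         if has_consecutive_vowels:
--             continue
--
--         # Check if word contains at least one vowel
--         has_vowels = any(letter.lower() in vowels for letter in word)
--         if has_vowels:
--             word_set.add(word)
--
--     return sorted(list(word_set))
-- ===== SOURCE B (Python) =====
-- def unique_words_with_vowels(string):
--     V = "aeiou"
--     kept = set()
--     cur = []        # characters of the word currently being scanned
--     run = 0         # length of the current consecutive-vowel run
--     bad = False     # word starts with a vowel, or has a run of >= 3 vowels
--     hasv = False    # word contains at least one vowel
--     for ch in string + " ":          # trailing space flushes the last word
--         if ch.isspace():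
--             if cur and not bad and hasv:
--                 kept.add("".join(cur))
--             cur, run, bad, hasv = [], 0, False, False
--         else:
--             if ch.lower() in V:
--                 if not cur:
--                     bad = True       # leading vowel
--                 run += 1
--                 hasv = True
--                 if run >= 3:
--                     bad = True       # three consecutive vowels
--             else:
--                 run = 0
--             cur.append(ch)
--     return sorted(kept)
-- ===== Notes on version B (the rewrite author's own statement) =====
-- stated objective: alternative
-- what changed: B drops split() and the per-word inner scans entirely: one character-level state machine over the raw string (current word chars, consecutive-vowel run, bad/has-vowel flags, flushed at whitespace) replaces A's word list plus three per-word passes.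
import Mathlib
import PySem

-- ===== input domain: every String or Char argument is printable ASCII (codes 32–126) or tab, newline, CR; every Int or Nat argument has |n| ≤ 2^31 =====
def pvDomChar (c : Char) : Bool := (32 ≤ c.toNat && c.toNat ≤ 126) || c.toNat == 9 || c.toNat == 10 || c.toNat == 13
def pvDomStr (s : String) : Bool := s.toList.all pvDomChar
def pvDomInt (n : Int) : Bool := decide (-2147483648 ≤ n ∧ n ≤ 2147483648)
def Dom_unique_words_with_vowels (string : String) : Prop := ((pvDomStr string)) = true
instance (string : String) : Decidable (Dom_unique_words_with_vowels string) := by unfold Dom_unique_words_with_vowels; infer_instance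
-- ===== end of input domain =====

-- B replaces A's split() + three per-word scans by a single character-level state machine over
-- the raw string (current word, vowel-run counter, bad/has-vowel flags, flush at whitespace);
-- objective: alternative (same asymptotic cost, different traversal).

-- ===== PORT A =====
def pvVowelsA : List Char := ['a', 'e', 'i', 'o', 'u']

-- A's inner loop: count of consecutive vowels, flag set and break at 3
def pvAScan : List Char → Int → Bool
  | [], _ => false
  | c :: rest, count =>
    if pvVowelsA.contains (PySem.Chars.lowerChar c) then
      if count + 1 ≥ 3 then true else pvAScan rest (count + 1)
    else pvAScan rest 0

def unique_words_with_vowels (string : String) : List String :=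
  let vowels := pvVowelsA
  let words := PySem.Str.split₀ string
  let word_set : PySem.Set String := words.foldl (fun ws word =>
    match PySem.Str.pyGet? word 0 with    -- word[0]; none unreachable: split() words are nonempty
    | none => ws
    | some c0 =>
      if vowels.contains (PySem.Chars.lowerChar c0) then ws
      else if pvAScan word.toList 0 then ws
      else if word.toList.any (fun letter => vowels.contains (PySem.Chars.lowerChar letter)) then
        PySem.Set.add ws word
      else ws) PySem.Set.empty
  PySem.List.sorted word_set (fun x => x) false

-- ===== PORT B =====
-- per-character vowel test  ch.lower() in V
def pvPB (c : Char) : Bool := (['a', 'e', 'i', 'o', 'u'] : List Char).contains (PySem.Chars.lowerChar c)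

-- the loop body's non-space branch: update (cur, run, bad, hasv) with one character
def pvStepW (st : List Char × Int × Bool × Bool) (ch : Char) : List Char × Int × Bool × Bool :=
  let (cur, run, bad, hasv) := st
  if pvPB ch then
    (cur ++ [ch], run + 1, (bad || cur.isEmpty) || decide (run + 1 ≥ 3), true)
  else
    (cur ++ [ch], 0, bad, hasv)

-- the loop of B: one pass over the characters, flushing the current word at whitespace
def pvBScan : List Char → List Char × Int × Bool × Bool → PySem.Set String → PySem.Set String
  | [], _, kept => kept
  | ch :: rest, (cur, run, bad, hasv), kept =>
    if PySem.Chars.isspace ch then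
      pvBScan rest ([], 0, false, false)
        (if !cur.isEmpty && !bad && hasv then PySem.Set.add kept (String.ofList cur) else kept)
    else
      pvBScan rest (pvStepW (cur, run, bad, hasv) ch) kept

def unique_words_with_vowels_alt (string : String) : List String :=
  PySem.List.sorted
    (pvBScan (string.toList ++ [' ']) ([], 0, false, false) PySem.Set.empty)
    (fun x => x) false

-- ===== PRECONDITION & SPEC =====
def Spec_unique_words_with_vowels (string : String) (out : List String) : Prop := out = unique_words_with_vowels_alt string
instance (string : String) (out : List String) : Decidable (Spec_unique_words_with_vowels string out) := by unfold Spec_unique_words_with_vowels; infer_instance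

-- ===== CLAIM (what is proved, stated in full; the proofs are below) =====
def Claim_equal_unique_words_with_vowels : Prop := ∀ (string : String), Dom_unique_words_with_vowels string → Spec_unique_words_with_vowels string (unique_words_with_vowels string)

-- ===== LEMMAS AND PROOFS =====

-- A's per-character vowel test (same function as B's, by definition)
def pvPA (c : Char) : Bool := pvVowelsA.contains (PySem.Chars.lowerChar c)

lemma pvPB_eq_pvPA (c : Char) : pvPB c = pvPA c := rfl

-- A's whole keep-decision for one word (as a list of characters)
def pvKeepA (l : List Char) : Bool :=
  match l with
  | [] => false
  | c :: _ => !pvPA c && !pvAScan l 0 && l.any pvPA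

-- run / bad / hasv components of B's fold, as left recursions
def pvRunEnd : List Char → Int → Int
  | [], r => r
  | c :: t, r => if pvPA c then pvRunEnd t (r + 1) else pvRunEnd t 0

def pvBadStep : List Char → Int → Bool → Bool
  | [], _, _ => false
  | c :: t, r, e =>
    if pvPA c then (e || decide (r + 1 ≥ 3)) || pvBadStep t (r + 1) false
    else pvBadStep t 0 false

lemma pvSnoc_isEmpty (l : List Char) (c : Char) : (l ++ [c]).isEmpty = false := by simp

-- characterisation of B's state fold
lemma pvFoldl_stepW (rest : List Char) : ∀ (cur : List Char) (r : Int) (b h : Bool),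
    List.foldl pvStepW (cur, r, b, h) rest =
      (cur ++ rest, pvRunEnd rest r, b || pvBadStep rest r cur.isEmpty, h || rest.any pvPA) := by
  induction rest with
  | nil => intro cur r b h; simp [pvRunEnd, pvBadStep]
  | cons c t ih =>
    intro cur r b h
    by_cases hc : pvPA c
    · simp only [List.foldl_cons, pvStepW, pvPB_eq_pvPA, hc, if_pos, ih]
      simp [pvRunEnd, pvBadStep, hc, pvSnoc_isEmpty, List.any_cons,
        Bool.or_assoc, Bool.or_comm, Bool.or_left_comm]
    · simp only [List.foldl_cons, pvStepW, pvPB_eq_pvPA, hc, if_neg, Bool.false_eq_true,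
        not_false_iff, ih]
      simp [pvRunEnd, pvBadStep, hc, pvSnoc_isEmpty, List.any_cons]

-- pvBadStep with the first-char flag off is exactly A's break-at-3 counter scan
lemma pvBadStep_eq_pvAScan (l : List Char) : ∀ r : Int, r = 0 ∨ r = 1 ∨ r = 2 →
    pvBadStep l r false = pvAScan l r := by
  induction l with
  | nil => intro r _; rfl
  | cons c t ih =>
    intro r hr
    by_cases hm : PySem.Chars.lowerChar c ∈ pvVowelsA
    · rcases hr with rfl | rfl | rfl
      · simp [pvBadStep, pvAScan, pvPA, hm, ih 1 (by omega)]
      · simp [pvBadStep, pvAScan, pvPA, hm, ih 2 (by omega)]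
      · simp [pvBadStep, pvAScan, pvPA, hm]
    · simp [pvBadStep, pvAScan, pvPA, hm, ih 0 (by omega)]

-- B's flush condition equals A's keep-decision
lemma pvFlush_eq_keepA (cur : List Char) :
    (!cur.isEmpty && !pvBadStep cur 0 true && cur.any pvPA) = pvKeepA cur := by
  cases cur with
  | nil => rfl
  | cons c t =>
    by_cases hm : PySem.Chars.lowerChar c ∈ pvVowelsA
    · simp [pvBadStep, pvKeepA, pvPA, hm]
    · simp [pvBadStep, pvKeepA, pvPA, pvAScan, hm,
        pvBadStep_eq_pvAScan t 0 (by omega), List.any_cons]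

-- the per-word accumulation both sides reduce to
def pvAddK (k : PySem.Set String) (w : List Char) : PySem.Set String :=
  if pvKeepA w then PySem.Set.add k (String.ofList w) else k

-- one-step equations for split₀.go (definitional)
lemma pvGo_nil (cur : List Char) (acc : List (List Char)) :
    PySem.Chars.split₀.go [] cur acc
      = if cur.isEmpty then acc.reverse else (cur.reverse :: acc).reverse := rfl

lemma pvGo_cons (c : Char) (rest cur : List Char) (acc : List (List Char)) :
    PySem.Chars.split₀.go (c :: rest) cur acc
      = if PySem.Chars.isspace c then
          (if cur.isEmpty then PySem.Chars.split₀.go rest [] acc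
           else PySem.Chars.split₀.go rest [] (cur.reverse :: acc))
        else PySem.Chars.split₀.go rest (c :: cur) acc := rfl

-- split₀.go shifts its accumulator to the front
lemma pvGo_acc (cs : List Char) : ∀ (cur : List Char) (acc : List (List Char)),
    PySem.Chars.split₀.go cs cur acc = acc.reverse ++ PySem.Chars.split₀.go cs cur [] := by
  induction cs with
  | nil =>
    intro cur acc
    by_cases hcur : cur.isEmpty <;> simp [pvGo_nil, hcur]
  | cons c t ih =>
    intro cur acc
    by_cases hs : PySem.Chars.isspace c
    · by_cases hcur : cur.isEmpty
      · simp only [pvGo_cons, hs, if_pos, hcur]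
        exact ih [] acc
      · simp only [pvGo_cons, hs, if_pos, hcur, Bool.false_eq_true, not_false_iff, if_neg]
        rw [ih [] (cur.reverse :: acc), ih [] [cur.reverse]]
        simp
    · simp only [pvGo_cons, hs, Bool.false_eq_true, not_false_iff, if_neg]
      exact ih (c :: cur) acc

-- MAIN: B's character scan computes the fold of pvAddK over split₀'s words
lemma pvBScan_eq_go (cs : List Char) : ∀ (cur : List Char) (r : Int) (b h : Bool)
    (kept : PySem.Set String),
    (cur, r, b, h) = List.foldl pvStepW ([], 0, false, false) cur →
    pvBScan (cs ++ [' ']) (cur, r, b, h) kept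
      = (PySem.Chars.split₀.go cs cur.reverse []).foldl pvAddK kept := by
  have hsp : PySem.Chars.isspace ' ' = true := by decide
  induction cs with
  | nil =>
    intro cur r b h kept hst
    rw [pvFoldl_stepW] at hst
    have hb : b = pvBadStep cur 0 true := by
      simpa using congrArg (fun st => st.2.2.1) hst
    have hh : h = cur.any pvPA := by
      simpa using congrArg (fun st => st.2.2.2) hst
    have hflush : (!cur.isEmpty && !b && h) = pvKeepA cur := by
      rw [hb, hh]; exact pvFlush_eq_keepA cur
    show pvBScan [' '] (cur, r, b, h) kept = _
    simp only [pvBScan, hsp, if_pos, hflush]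
    cases hcur : cur with
    | nil => simp [pvGo_nil, pvKeepA]
    | cons c0 t0 =>
      rw [← hcur]
      have hne : cur.reverse.isEmpty = false := by simp [hcur]
      simp [pvGo_nil, hne, pvAddK]
  | cons c t ih =>
    intro cur r b h kept hst
    by_cases hs : PySem.Chars.isspace c
    · -- flush (or skip) and restart with the empty state
      have hst' := hst
      rw [pvFoldl_stepW] at hst'
      have hb : b = pvBadStep cur 0 true := by
        simpa using congrArg (fun st => st.2.2.1) hst'
      have hh : h = cur.any pvPA := by
        simpa using congrArg (fun st => st.2.2.2) hst'
      have hflush : (!cur.isEmpty && !b && h) = pvKeepA cur := by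
        rw [hb, hh]; exact pvFlush_eq_keepA cur
      show pvBScan (c :: (t ++ [' '])) (cur, r, b, h) kept = _
      simp only [pvBScan, hs, if_pos, hflush]
      rw [ih [] 0 false false _ rfl]
      cases hcur : cur with
      | nil => simp [pvGo_cons, hs, pvKeepA]
      | cons c0 t0 =>
        rw [← hcur]
        have hne : cur.reverse.isEmpty = false := by simp [hcur]
        simp only [pvGo_cons, hs, if_pos, hne, Bool.false_eq_true, not_false_iff, if_neg,
          List.reverse_reverse, List.reverse_nil]
        rw [pvGo_acc t [] [cur]]
        simp [pvAddK]
    · -- ordinary character: one pvStepW step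
      show pvBScan (c :: (t ++ [' '])) (cur, r, b, h) kept = _
      simp only [pvBScan, hs, Bool.false_eq_true, not_false_iff, if_neg]
      have hstep : pvStepW (cur, r, b, h) c
          = List.foldl pvStepW ([], 0, false, false) (cur ++ [c]) := by
        rw [List.foldl_append, ← hst]; rfl
      rcases hcv : pvStepW (cur, r, b, h) c with ⟨cur', r', b', h'⟩
      have hcur' : cur' = cur ++ [c] := by
        have h2 := hcv
        unfold pvStepW at h2
        by_cases hc : pvPB c <;> simp [hc] at h2 <;> exact h2.1.symm
      rw [ih cur' r' b' h' kept (by rw [← hcv, hstep, hcur'])]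
      rw [hcur']
      have hrev : (cur ++ [c]).reverse = c :: cur.reverse := by simp
      rw [hrev]
      simp [pvGo_cons, hs]

-- A's loop body equals "if pvKeepA then add" (over the word's characters)
lemma pv_bodyA (ws : PySem.Set String) (word : String) :
    (match PySem.Str.pyGet? word 0 with
      | none => ws
      | some c0 =>
        if pvVowelsA.contains (PySem.Chars.lowerChar c0) then ws
        else if pvAScan word.toList 0 then ws
        else if word.toList.any (fun letter => pvVowelsA.contains (PySem.Chars.lowerChar letter)) then
          PySem.Set.add ws word
        else ws)
    = (if pvKeepA word.toList then PySem.Set.add ws word else ws) := by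
  have hget : PySem.Str.pyGet? word 0 = word.toList[0]? := by
    simp [PySem.Str.pyGet?_eq, PySem.Chars.pyGet?_eq_listPyGet?, PySem.List.pyGet?_zero]
  rw [hget]
  cases hw : word.toList with
  | nil => rfl
  | cons c0 t =>
    simp only [List.getElem?_cons_zero, pvKeepA]
    by_cases h0 : pvPA c0 <;> by_cases h1 : pvAScan (c0 :: t) 0 <;>
      simp [pvPA] at h0 h1 ⊢ <;> simp [h0, h1]

-- ===== VERDICT (by name: the statement is the Claim_ definition above) =====
theorem unique_words_with_vowels_spec : Claim_equal_unique_words_with_vowels := by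
  intro s _
  show unique_words_with_vowels s = unique_words_with_vowels_alt s
  show PySem.List.sorted
      ((PySem.Str.split₀ s).foldl (fun ws word =>
        match PySem.Str.pyGet? word 0 with
        | none => ws
        | some c0 =>
          if pvVowelsA.contains (PySem.Chars.lowerChar c0) then ws
          else if pvAScan word.toList 0 then ws
          else if word.toList.any (fun letter => pvVowelsA.contains (PySem.Chars.lowerChar letter)) then
            PySem.Set.add ws word
          else ws) PySem.Set.empty) (fun x => x) false
    = _
  unfold unique_words_with_vowels_alt
  congr 1
  rw [List.foldl_ext (g := fun ws w => if pvKeepA w.toList then PySem.Set.add ws w else ws)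
        (H := fun ws w _ => pv_bodyA ws w)]
  rw [PySem.Str.split₀, PySem.Chars.split₀, List.foldl_map]
  rw [pvBScan_eq_go s.toList [] 0 false false PySem.Set.empty rfl]
  simp only [List.reverse_nil]
  rw [List.foldl_ext (g := pvAddK) (H := fun acc w _ => by simp [pvAddK])]
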